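-- pv_equiv track=rewrite | github.com/L200170042/prak_ASD_B | modul 1/laporan praktikum.py | jmlkonso
-- ===== SOURCE A (Python) =====
-- def jmlkonso(string):
--     vok = 0
--     x = "aiueoAIUEO"
--     for car in string.lower():
--         if car not in x:
--             vok += 1
--     vokal = len(string)
--     return(vokal,vok)
-- ===== SOURCE B (Python) =====
-- def jmlkonso(string):
--     freq = {}
--     for car in string.lower():
--         freq[car] = freq.get(car, 0) + 1
--     n = len(string)
--     vowel_total = sum(freq.get(v, 0) for v in "aiueo")
--     return (n, n - vowel_total)
-- ===== Notes on version B (the rewrite author's own statement) =====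
-- stated objective: alternative
-- what changed: Replaces A's per-character membership-test loop (testing each lowered character against the vowel string) by a frequency table of the lowered string built in one pass, then summing the five vowel counts and returning the non-vowel count as the complement len(string) - vowel_total.
import Mathlib
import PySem

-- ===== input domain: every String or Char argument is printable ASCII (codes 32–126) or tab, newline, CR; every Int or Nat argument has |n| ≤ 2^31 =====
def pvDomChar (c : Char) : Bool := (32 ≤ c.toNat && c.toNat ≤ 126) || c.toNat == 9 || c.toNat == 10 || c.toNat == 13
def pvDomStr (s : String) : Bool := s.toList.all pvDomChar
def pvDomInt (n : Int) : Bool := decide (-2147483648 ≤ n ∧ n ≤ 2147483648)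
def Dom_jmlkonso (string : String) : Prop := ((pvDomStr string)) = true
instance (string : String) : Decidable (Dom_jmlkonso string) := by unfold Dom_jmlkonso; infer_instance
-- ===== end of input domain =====

-- B replaces A's per-character scan-and-test loop by a frequency table (dict counter) of the
-- lowered string, summing the five vowel counts and returning the non-vowel count as the
-- complement len - vowel_total; objective: alternative (different data structure, same cost).

-- ===== PORT A =====
def jmlkonso (string : String) : Int × Int :=
  let x := "aiueoAIUEO"
  let vok : Int := (PySem.Str.lower string).toList.foldl
    (fun vok car => if car ∉ x.toList then vok + 1 else vok) 0
  let vokal : Int := PySem.Str.len string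
  (vokal, vok)

-- ===== PORT B =====
def jmlkonso_alt (string : String) : Int × Int :=
  let freq : PySem.Dict Char Int := (PySem.Str.lower string).toList.foldl
    (fun d car => d.insert car (d.getD car 0 + 1)) PySem.Dict.empty
  let n : Int := PySem.Str.len string
  let vowelTotal : Int := ("aiueo".toList.map (fun v => freq.getD v 0)).sum
  (n, n - vowelTotal)

-- ===== PRECONDITION & SPEC =====
def Spec_jmlkonso (string : String) (out : Int × Int) : Prop := out = jmlkonso_alt string
instance (string : String) (out : Int × Int) : Decidable (Spec_jmlkonso string out) := by unfold Spec_jmlkonso; infer_instance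

-- ===== CLAIM (what is proved, stated in full; the proofs are below) =====
def Claim_equal_jmlkonso : Prop := ∀ (string : String), Dom_jmlkonso string → Spec_jmlkonso string (jmlkonso string)

-- ===== LEMMAS AND PROOFS =====

theorem chle (a b : Char) : (a ≤ b) ↔ a.toNat ≤ b.toNat := ge_iff_le

-- lowerChar never produces an ASCII uppercase letter
theorem lowerChar_not_upper (c : Char) :
    ¬ (65 ≤ (PySem.Chars.lowerChar c).toNat ∧ (PySem.Chars.lowerChar c).toNat ≤ 90) := by
  unfold PySem.Chars.lowerChar PySem.Chars.isupper
  by_cases h : ('A' ≤ c ∧ c ≤ 'Z')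
  · have h65 : (65:Nat) ≤ c.toNat := (chle _ _).mp h.1
    have h90 : c.toNat ≤ 90 := (chle _ _).mp h.2
    rw [if_pos (by simp [h.1, h.2])]
    have : (Char.ofNat (c.toNat + 32)).toNat = c.toNat + 32 := by
      unfold Char.ofNat
      rw [dif_pos (Or.inl (by omega))]
      rfl
    omega
  · rw [if_neg (by simpa [not_and_or] using (by tauto : ¬('A' ≤ c ∧ c ≤ 'Z')))]
    intro ⟨a, b⟩
    exact h ⟨(chle _ _).mpr a, (chle _ _).mpr b⟩

-- on a lowered character, membership in "aiueoAIUEO" and in "aiueo" coincide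
theorem mem_big_iff_small (c : Char) :
    (PySem.Chars.lowerChar c ∈ "aiueoAIUEO".toList) ↔ (PySem.Chars.lowerChar c ∈ "aiueo".toList) := by
  have hnu := lowerChar_not_upper c
  constructor
  · intro h
    simp only [show "aiueoAIUEO".toList = ['a','i','u','e','o','A','I','U','E','O'] from rfl,
      List.mem_cons, List.not_mem_nil, or_false] at h
    simp only [show "aiueo".toList = ['a','i','u','e','o'] from rfl,
      List.mem_cons, List.not_mem_nil, or_false]
    rcases h with h|h|h|h|h|h|h|h|h|h <;>
      first
        | tauto
        | (exfalso; rw [h] at hnu; exact hnu (by decide))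
  · intro h
    simp only [show "aiueo".toList = ['a','i','u','e','o'] from rfl, List.mem_cons,
      List.not_mem_nil, or_false] at h
    simp only [show "aiueoAIUEO".toList = ['a','i','u','e','o','A','I','U','E','O'] from rfl,
      List.mem_cons, List.not_mem_nil, or_false]
    tauto

-- A's loop counts the characters outside "aiueoAIUEO"
theorem vok_eq (ms : List Char) :
    ms.foldl (fun acc car => if car ∉ ("aiueoAIUEO".toList) then acc + 1 else acc) (0:Int)
      = (ms.length : Int) - (ms.countP (fun car => decide (car ∈ "aiueoAIUEO".toList)) : Int) := by
  rw [show (fun (acc:Int) car => if car ∉ "aiueoAIUEO".toList then acc + 1 else acc)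
        = (fun (acc:Int) car => if (fun c => decide (c ∉ "aiueoAIUEO".toList)) car = true then acc + 1 else acc) from by
      funext a c; simp]
  rw [PySem.List.foldl_if_add_one]
  have h := List.length_eq_countP_add_countP (l := ms) (fun c => decide (c ∈ "aiueoAIUEO".toList))
  have he : ms.countP (fun a => decide ¬decide (a ∈ "aiueoAIUEO".toList) = true)
      = ms.countP (fun c => decide (c ∉ "aiueoAIUEO".toList)) := by
    apply List.countP_congr; intro a _; simp
  omega

-- the five vowel counts sum to the number of vowels
theorem sum_counts (ms : List Char) :
    ms.countP (fun c => decide (c ∈ ['a','i','u','e','o']))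
      = ms.count 'a' + ms.count 'i' + ms.count 'u' + ms.count 'e' + ms.count 'o' := by
  induction ms with
  | nil => simp
  | cons c t ih =>
    simp only [List.countP_cons, List.count_cons, ih]
    by_cases h1 : c = 'a' <;> by_cases h2 : c = 'i' <;> by_cases h3 : c = 'u' <;>
      by_cases h4 : c = 'e' <;> by_cases h5 : c = 'o' <;>
      simp_all <;> omega

-- ===== VERDICT (by name: the statement is the Claim_ definition above) =====
theorem jmlkonso_spec : Claim_equal_jmlkonso := by
  intro string _
  unfold Spec_jmlkonso jmlkonso jmlkonso_alt
  simp only [PySem.Str.toList_lower, PySem.Dict.foldl_insert_getD_add_one_eq_counter]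
  set ls := string.toList with hls
  set ms := PySem.Chars.lower ls with hms
  rw [vok_eq]
  have hlen : PySem.Str.len string = (ms.length : Int) := by
    rw [PySem.Str.len_eq, hms]; simp [PySem.Chars.lower, hls]
  have hcongr : ms.countP (fun car => decide (car ∈ "aiueoAIUEO".toList))
      = ms.countP (fun c => decide (c ∈ "aiueo".toList)) := by
    apply List.countP_congr
    intro a ha
    rw [hms] at ha
    simp only [PySem.Chars.lower, List.mem_map] at ha
    obtain ⟨c, _, rfl⟩ := ha
    have h := mem_big_iff_small c
    simp only [show "aiueoAIUEO".toList = ['a','i','u','e','o','A','I','U','E','O'] from rfl,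
      show "aiueo".toList = ['a','i','u','e','o'] from rfl, List.mem_cons,
      List.not_mem_nil, or_false] at h
    simpa using h
  rw [hcongr]
  have hs := sum_counts ms
  simp only [show "aiueo".toList = ['a','i','u','e','o'] from rfl, List.map, List.sum_cons,
    List.sum_nil, PySem.Dict.getD_counter]
  rw [Prod.mk.injEq]
  refine ⟨rfl, ?_⟩
  rw [hs, hlen]
  push_cast
  ring
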